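-- pv_equiv track=rewrite | github.com/LambrG/AoC2024 | util_for_12.py | count_borders_one_direction
-- ===== SOURCE A (Python) =====
-- def count_borders_one_direction(grid):
--     count = 0
--     sides = []
--     # Check top borde
--
--     # Check vertical borders (each row's transition from False to True)
--     for gr in range(len(grid)):
--         for gc in range(len(grid[0])):
--             a = False if gr == 0 else grid[gr-1][gc]
--             pattern = (a, grid[gr][gc])
--             if pattern == (False, True):
--                 count += 1
--             else:
--                 if count > 0:
--                     sides.append(count)
--                 count = 0
--         if count > 0:
--             sides.append(count)
--         count = 0
--     return sum(sides), len(sides)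
-- ===== SOURCE B (Python) =====
-- def count_borders_one_direction(grid):
--     # Inclusion-exclusion: segments = border cells - horizontally adjacent border pairs.
--     rows = len(grid)
--     width = len(grid[0]) if grid else 0
--
--     def border(r, c):
--         return grid[r][c] and not (r > 0 and grid[r - 1][c])
--
--     total = sum(1 for r in range(rows) for c in range(width) if border(r, c))
--     pairs = sum(1 for r in range(rows) for c in range(width - 1)
--                 if border(r, c) and border(r, c + 1))
--     return total, total - pairs
-- ===== Notes on version B (the rewrite author's own statement) =====
-- stated objective: simpler
-- what changed: Replaced A's streaming run-length state machine (a running count flushed into a sides list at every non-border cell and row end, then summed) by two independent global counts and the inclusion-exclusion identity segments = border cells - horizontally adjacent border pairs; no scan state survives between cells.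
import Mathlib
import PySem

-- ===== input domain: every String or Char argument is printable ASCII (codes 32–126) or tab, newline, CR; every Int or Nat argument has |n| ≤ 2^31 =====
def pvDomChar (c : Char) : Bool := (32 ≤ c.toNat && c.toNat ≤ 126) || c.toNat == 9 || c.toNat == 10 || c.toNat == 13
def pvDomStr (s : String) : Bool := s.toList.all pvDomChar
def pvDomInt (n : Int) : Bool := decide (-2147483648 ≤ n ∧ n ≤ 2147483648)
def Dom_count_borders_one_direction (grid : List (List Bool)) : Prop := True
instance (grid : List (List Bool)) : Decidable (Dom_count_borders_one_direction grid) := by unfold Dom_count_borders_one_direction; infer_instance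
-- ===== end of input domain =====

-- B drops A's run-length flush state machine for two independent global counts joined by the
-- identity segments = border cells - horizontally adjacent border pairs; objective: simpler.

-- ===== PORT A =====
-- A-side helpers: A's inner-loop body (count/flush state machine) and the end-of-row flush, verbatim
def pvStepA (st : Int × List Int) (b : Bool) : Int × List Int :=
  if b then (st.1 + 1, st.2) else (0, if st.1 > 0 then st.2 ++ [st.1] else st.2)

def pvFlushA (st : Int × List Int) : List Int :=
  if st.1 > 0 then st.2 ++ [st.1] else st.2

-- grid[0] / grid[gr][gc] / grid[gr-1][gc] ported with pyGetD: exact under Pre_ (all indices in range)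
def count_borders_one_direction (grid : List (List Bool)) : Int × Int :=
  let st :=
    (PySem.List.pyRange 0 (PySem.List.len grid) 1).foldl
      (fun (st : Int × List Int) gr =>
        let st :=
          (PySem.List.pyRange 0 (PySem.List.len (PySem.List.pyGetD grid 0 [])) 1).foldl
            (fun (st : Int × List Int) gc =>
              let a : Bool := if gr = 0 then false
                else PySem.List.pyGetD (PySem.List.pyGetD grid (gr - 1) []) gc false
              let pattern := (a, PySem.List.pyGetD (PySem.List.pyGetD grid gr []) gc false)
              pvStepA st (pattern == (false, true))) st
        ((0 : Int), pvFlushA st))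
      ((0 : Int), ([] : List Int))
  (st.2.sum, PySem.List.len st.2)

-- ===== PORT B =====
-- B-side helper: Source B's nested `border(r, c)` predicate, verbatim (short-circuit `and`/`not` as && / !)
def pvBorderB (grid : List (List Bool)) (r c : Int) : Bool :=
  PySem.List.pyGetD (PySem.List.pyGetD grid r []) c false
    && !(decide (r > 0) && PySem.List.pyGetD (PySem.List.pyGetD grid (r - 1) []) c false)

-- sum(1 for … if cond) ported as a filterMap producing the 1s, then summed
def count_borders_one_direction_alt (grid : List (List Bool)) : Int × Int :=
  let rows := PySem.List.len grid
  let width : Int := if grid.isEmpty then 0 else PySem.List.len (PySem.List.pyGetD grid 0 [])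
  let total : Int :=
    ((PySem.List.pyRange 0 rows 1).flatMap (fun r =>
      (PySem.List.pyRange 0 width 1).filterMap (fun c =>
        if pvBorderB grid r c then some (1 : Int) else none))).sum
  let pairs : Int :=
    ((PySem.List.pyRange 0 rows 1).flatMap (fun r =>
      (PySem.List.pyRange 0 (width - 1) 1).filterMap (fun c =>
        if pvBorderB grid r c && pvBorderB grid r (c + 1) then some (1 : Int) else none))).sum
  (total, total - pairs)

-- ===== PRECONDITION & SPEC =====
-- Pre_ excludes exactly the ragged grids on which the Python A raises IndexError: a row shorter than row 0.
def Pre_count_borders_one_direction (grid : List (List Bool)) : Prop :=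
  ∀ r ∈ grid, (grid.getD 0 []).length ≤ r.length
instance (grid : List (List Bool)) : Decidable (Pre_count_borders_one_direction grid) := by
  unfold Pre_count_borders_one_direction; infer_instance

def pvWitness_count_borders_one_direction : List (List Bool) := [[true, false], [true, true]]

def Spec_count_borders_one_direction (grid : List (List Bool)) (out : Int × Int) : Prop :=
  out = count_borders_one_direction_alt grid
instance (grid : List (List Bool)) (out : Int × Int) : Decidable (Spec_count_borders_one_direction grid out) := by
  unfold Spec_count_borders_one_direction; infer_instance

-- ===== CLAIM (what is proved, stated in full; the proofs are below) =====
def Claim_equal_count_borders_one_direction : Prop :=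
  ∀ (grid : List (List Bool)), Dom_count_borders_one_direction grid →
    Pre_count_borders_one_direction grid →
    Spec_count_borders_one_direction grid (count_borders_one_direction grid)

-- ===== LEMMAS AND PROOFS =====

-- width = len(grid[0]) (0 for the empty grid)
def pvW (grid : List (List Bool)) : Nat := (grid.getD 0 []).length

-- the border test at cell (k, c), as both programs evaluate it
def pvBorderAt (grid : List (List Bool)) (k c : Nat) : Bool :=
  !(if k = 0 then false else (grid.getD (k - 1) []).getD c false) && (grid.getD k []).getD c false

-- the border booleans of row k
def pvBorderRow (grid : List (List Bool)) (k : Nat) : List Bool :=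
  (List.range (pvW grid)).map (pvBorderAt grid k)

-- number of runs of `true`, counting a run open on the left when p = true
def pvRuns : Bool → List Bool → Nat
  | p, [] => if p then 1 else 0
  | p, b :: bs => if b then pvRuns true bs else (if p then 1 else 0) + pvRuns false bs

-- number of adjacent true pairs, with a phantom left neighbour p
def pvAdjL : Bool → List Bool → Nat
  | _, [] => 0
  | p, b :: bs => (if p && b then 1 else 0) + pvAdjL b bs

lemma pvBeq_pair (a b : Bool) : ((a, b) == (false, true)) = (!a && b) := by
  cases a <;> cases b <;> rfl

-- characterisation of A's flushed run-length state machine: sum = #true cells, length = #runs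
lemma pvFoldA_char (bs : List Bool) : ∀ (c : Int) (s : List Int), 0 ≤ c →
    (pvFlushA (bs.foldl pvStepA (c, s))).sum = s.sum + c + (bs.countP id : Int) ∧
    (pvFlushA (bs.foldl pvStepA (c, s))).length = s.length + pvRuns (decide (0 < c)) bs := by
  induction bs with
  | nil =>
    intro c s hc
    simp only [List.foldl_nil, pvFlushA, pvRuns]
    constructor
    · split_ifs with h <;> simp <;> omega
    · split_ifs with h h2 h3 <;> simp_all <;> omega
  | cons b bs ih =>
    intro c s hc
    cases b with
    | true =>
      have hs' : pvStepA (c, s) true = (c + 1, s) := rfl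
      obtain ⟨ih1, ih2⟩ := ih (c + 1) s (by omega)
      rw [List.foldl_cons, hs']
      constructor
      · rw [ih1, List.countP_cons]
        simp only [id]
        push_cast
        ring
      · rw [ih2]
        have h1 : decide ((0:Int) < c + 1) = true := by simp; omega
        rw [h1]
        simp [pvRuns]
    | false =>
      have hs' : pvStepA (c, s) false = (0, if c > 0 then s ++ [c] else s) := rfl
      obtain ⟨ih1, ih2⟩ := ih 0 (if c > 0 then s ++ [c] else s) (by omega)
      rw [List.foldl_cons, hs']
      have h0 : decide ((0:Int) < 0) = false := by decide
      constructor
      · rw [ih1, List.countP_cons]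
        have hsum : (if c > 0 then s ++ [c] else s).sum = s.sum + c := by
          rcases (by omega : 0 < c ∨ c = 0) with h | h
          · rw [if_pos h]; simp
          · rw [h]; simp
        rw [hsum]
        simp only [id]
        push_cast
        ring
      · rw [ih2, h0]
        have hl : (if c > 0 then s ++ [c] else s).length
            = s.length + (if decide (0 < c) = true then 1 else 0) := by
          rcases (by omega : 0 < c ∨ c = 0) with h | h
          · rw [if_pos h, if_pos (by simpa using h)]; simp
          · rw [h]; simp
        rw [hl]
        simp [pvRuns]
        omega

-- inclusion-exclusion per row: #true cells = #runs + #adjacent pairs (phantom left neighbour p)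
lemma pvCount_runs_adj (bs : List Bool) : ∀ p : Bool,
    bs.countP id + (if p then 1 else 0) = pvRuns p bs + pvAdjL p bs := by
  induction bs with
  | nil => intro p; simp [pvRuns, pvAdjL]
  | cons b bs ih =>
    intro p
    rw [List.countP_cons]
    cases b <;> cases p <;> simp [pvRuns, pvAdjL] <;> have := ih true <;> have := ih false <;>
      simp_all <;> omega

-- A's inner loop over one row is pvStepA folded over pvBorderRow
lemma pvInner_eq (grid : List (List Bool)) (k : Nat) (s : Int × List Int) :
    (PySem.List.pyRange 0 (PySem.List.len (PySem.List.pyGetD grid 0 [])) 1).foldl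
      (fun st gc =>
        let a : Bool := if (k : Int) = 0 then false
          else PySem.List.pyGetD (PySem.List.pyGetD grid ((k : Int) - 1) []) gc false
        let pattern := (a, PySem.List.pyGetD (PySem.List.pyGetD grid (k : Int) []) gc false)
        pvStepA st (pattern == (false, true))) s
    = (pvBorderRow grid k).foldl pvStepA s := by
  have hlen : PySem.List.len (PySem.List.pyGetD grid 0 []) = ((pvW grid : Nat) : Int) := by
    simp [PySem.List.pyGetD_zero, pvW]
  rw [hlen, PySem.List.pyRange_zero_natCast, List.foldl_map, pvBorderRow, List.foldl_map]
  apply PySem.List.foldl_congr_mem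
  intro acc c _
  simp only [pvBeq_pair, PySem.List.pyGetD_natCast, Nat.cast_eq_zero, pvBorderAt]
  cases k with
  | zero => simp
  | succ n =>
    rw [if_neg (Nat.succ_ne_zero n), if_neg (Nat.succ_ne_zero n)]
    have h1 : ((n + 1 : Nat) : Int) - 1 = (n : Int) := by push_cast; ring
    rw [h1]
    simp [PySem.List.pyGetD_natCast]

-- A rewritten as the range fold over pvBorderRow
lemma pvA_eq (grid : List (List Bool)) :
    count_borders_one_direction grid =
      (let sa := (List.range grid.length).foldl
          (fun st r => ((0 : Int), pvFlushA ((pvBorderRow grid r).foldl pvStepA st)))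
          ((0 : Int), ([] : List Int));
       (sa.2.sum, PySem.List.len sa.2)) := by
  unfold count_borders_one_direction
  have hlen : PySem.List.len grid = ((grid.length : Nat) : Int) := by simp
  rw [hlen, PySem.List.pyRange_zero_natCast, List.foldl_map]
  exact congrArg (fun F : Int × List Int => (F.2.sum, PySem.List.len F.2))
    (PySem.List.foldl_congr_mem _ _ _ _ (fun acc r _ =>
      congrArg (fun t => ((0 : Int), pvFlushA t)) (pvInner_eq grid r acc)))

-- A's fold across rows: final count = 0, sum of sides = Σ #true, number of sides = Σ #runs
lemma pvRows (grid : List (List Bool)) : ∀ k : Nat,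
    ((List.range k).foldl
        (fun st r => ((0 : Int), pvFlushA ((pvBorderRow grid r).foldl pvStepA st)))
        ((0 : Int), ([] : List Int))).1 = 0 ∧
    ((List.range k).foldl
        (fun st r => ((0 : Int), pvFlushA ((pvBorderRow grid r).foldl pvStepA st)))
        ((0 : Int), ([] : List Int))).2.sum
      = ((List.range k).map (fun r => ((pvBorderRow grid r).countP id : Int))).sum ∧
    (((List.range k).foldl
        (fun st r => ((0 : Int), pvFlushA ((pvBorderRow grid r).foldl pvStepA st)))
        ((0 : Int), ([] : List Int))).2.length : Int)
      = ((List.range k).map (fun r => ((pvRuns false (pvBorderRow grid r)) : Int))).sum := by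
  intro k
  induction k with
  | zero => simp
  | succ k ih =>
    obtain ⟨ih0, ih1, ih2⟩ := ih
    rw [List.range_succ]
    rw [List.foldl_append, List.foldl_cons, List.foldl_nil]
    set sa := (List.range k).foldl
        (fun st r => ((0 : Int), pvFlushA ((pvBorderRow grid r).foldl pvStepA st)))
        ((0 : Int), ([] : List Int)) with hsa
    have hsaeq : ((0 : Int), sa.2) = sa := by rw [← ih0]
    rw [← hsaeq]
    obtain ⟨hsum, hlen⟩ := pvFoldA_char (pvBorderRow grid k) 0 sa.2 (by omega)
    have hdec : decide ((0:Int) < 0) = false := by decide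
    rw [hdec] at hlen
    refine ⟨rfl, ?_, ?_⟩
    · simp only [hsum, List.map_append, List.sum_append, ih1]
      simp
    · simp only [hlen, List.map_append, List.sum_append]
      push_cast
      rw [← ih2]
      simp

-- sum(1 for x in l if g x) = countP
lemma pvSum_filter_ones {α : Type} (l : List α) (g : α → Bool) :
    (l.filterMap (fun c => if g c then some (1 : Int) else none)).sum = (l.countP g : Int) := by
  induction l with
  | nil => simp
  | cons x l ih =>
    rw [List.filterMap_cons, List.countP_cons]
    by_cases h : g x <;> simp [h, ih] <;> omega

-- B's width expression equals pvW
lemma pvWidth_eq (grid : List (List Bool)) :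
    (if grid.isEmpty then (0 : Int) else PySem.List.len (PySem.List.pyGetD grid 0 []))
      = ((pvW grid : Nat) : Int) := by
  cases grid <;> simp [pvW, PySem.List.pyGetD_zero]

-- Source B's border(r, c) at natural indices is pvBorderAt
lemma pvBorderB_eq (grid : List (List Bool)) (r c : Nat) :
    pvBorderB grid (r : Int) (c : Int) = pvBorderAt grid r c := by
  unfold pvBorderB pvBorderAt
  cases r with
  | zero => simp [PySem.List.pyGetD_zero, List.getD_eq_getElem?_getD, Bool.and_comm]
  | succ n =>
    have h1 : ((n + 1 : Nat) : Int) - 1 = (n : Int) := by push_cast; ring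
    have h2 : decide ((0 : Int) < ((n + 1 : Nat) : Int)) = true := by simp
    rw [h1, h2]
    simp only [PySem.List.pyGetD_natCast, Bool.true_and]
    simp [Bool.and_comm]

-- adjacent-pair count of (range' k (n+1)).map f, left phantom b, as an indexed countP
lemma pvAdjL_range' (f : Nat → Bool) : ∀ (n k : Nat) (b : Bool),
    pvAdjL b ((List.range' k (n + 1)).map f)
      = (if b && f k then 1 else 0) + (List.range' k n).countP (fun c => f c && f (c + 1)) := by
  intro n
  induction n with
  | zero => intro k b; simp [pvAdjL]
  | succ n ih =>
    intro k b
    rw [List.range'_succ, List.map_cons]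
    show (if b && f k then 1 else 0) + pvAdjL (f k) ((List.range' (k+1) (n+1)).map f) = _
    rw [ih (k + 1) (f k), List.range'_succ, List.countP_cons]
    have : k + 1 = k + 1 := rfl
    omega

-- the pair count over range (n-1) is pvAdjL false of the border row of length n
lemma pvAdjL_range (f : Nat → Bool) (n : Nat) :
    pvAdjL false ((List.range n).map f)
      = (List.range (n - 1)).countP (fun c => f c && f (c + 1)) := by
  cases n with
  | zero => simp [pvAdjL]
  | succ m =>
    rw [List.range_eq_range', List.range_eq_range', pvAdjL_range' f m 0 false]
    simp

-- per-row reduction of B's total term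
lemma pvB_total_row (grid : List (List Bool)) (r : Nat) :
    ((PySem.List.pyRange 0 ((pvW grid : Nat) : Int) 1).filterMap (fun c =>
        if pvBorderB grid (r : Int) c then some (1 : Int) else none)).sum
      = ((pvBorderRow grid r).countP id : Int) := by
  rw [PySem.List.pyRange_zero_natCast, List.filterMap_map]
  simp only [Function.comp_def]
  rw [pvSum_filter_ones]
  rw [pvBorderRow, List.countP_map]
  congr 1
  apply List.countP_congr
  intro c _
  simp [Function.comp, pvBorderB_eq]

-- per-row reduction of B's pairs term
lemma pvB_pairs_row (grid : List (List Bool)) (r : Nat) :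
    ((PySem.List.pyRange 0 (((pvW grid : Nat) : Int) - 1) 1).filterMap (fun c =>
        if pvBorderB grid (r : Int) c && pvBorderB grid (r : Int) (c + 1) then some (1 : Int) else none)).sum
      = (pvAdjL false (pvBorderRow grid r) : Int) := by
  cases hW : pvW grid with
  | zero =>
    rw [PySem.List.pyRange_one_eq_nil (by simp)]
    simp [pvBorderRow, hW, pvAdjL]
  | succ m =>
    have h1 : (((m + 1 : Nat) : Int) - 1) = ((m : Nat) : Int) := by push_cast; ring
    rw [h1, PySem.List.pyRange_zero_natCast, List.filterMap_map]
    simp only [Function.comp_def]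
    rw [pvSum_filter_ones]
    rw [pvBorderRow, hW, pvAdjL_range (pvBorderAt grid r) (m + 1)]
    simp only [Nat.add_sub_cancel]
    congr 1
    apply List.countP_congr
    intro c _
    have h2 : ((c : Nat) : Int) + 1 = ((c + 1 : Nat) : Int) := by push_cast; ring
    simp only [h2, pvBorderB_eq]

-- sum over a flatMap as sum of per-row sums
lemma pvSum_flatMap {α : Type} (l : List α) (f : α → List Int) :
    (l.flatMap f).sum = (l.map (fun x => (f x).sum)).sum := by
  induction l with
  | nil => rfl
  | cons x l ih => simp [List.flatMap_cons, ih]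

-- ===== VERDICT (by name: the statement is the Claim_ definition above) =====
theorem count_borders_one_direction_spec : Claim_equal_count_borders_one_direction := by
  unfold Claim_equal_count_borders_one_direction
  intro grid _ _
  unfold Spec_count_borders_one_direction
  rw [pvA_eq]
  unfold count_borders_one_direction_alt
  simp only [pvWidth_eq]
  have hlen : PySem.List.len grid = ((grid.length : Nat) : Int) := by simp
  rw [hlen]
  rw [PySem.List.pyRange_zero_natCast grid.length]
  rw [List.flatMap_map, List.flatMap_map]
  rw [pvSum_flatMap, pvSum_flatMap]
  have htot : ((List.range grid.length).map (fun x : Nat =>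
      ((PySem.List.pyRange 0 ((pvW grid : Nat) : Int) 1).filterMap (fun c =>
        if pvBorderB grid (x : Int) c then some (1 : Int) else none)).sum)).sum
      = ((List.range grid.length).map (fun r => ((pvBorderRow grid r).countP id : Int))).sum :=
    congrArg List.sum (List.map_congr_left fun r _ => pvB_total_row grid r)
  have hpair : ((List.range grid.length).map (fun x : Nat =>
      ((PySem.List.pyRange 0 (((pvW grid : Nat) : Int) - 1) 1).filterMap (fun c =>
        if pvBorderB grid (x : Int) c && pvBorderB grid (x : Int) (c + 1) then some (1 : Int) else none)).sum)).sum
      = ((List.range grid.length).map (fun r => (pvAdjL false (pvBorderRow grid r) : Int))).sum :=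
    congrArg List.sum (List.map_congr_left fun r _ => pvB_pairs_row grid r)
  rw [htot, hpair]
  obtain ⟨_, h1, h2⟩ := pvRows grid grid.length
  rw [h1]
  simp only [PySem.List.len_eq]
  rw [h2]
  -- remains: (Σ count, Σ runs) = (Σ count, Σ count − Σ adj), from pvCount_runs_adj per row
  have hpt : ∀ r : Nat, ((pvBorderRow grid r).countP id : Int)
      = ((pvRuns false (pvBorderRow grid r)) : Int) + (pvAdjL false (pvBorderRow grid r) : Int) := by
    intro r
    have h := pvCount_runs_adj (pvBorderRow grid r) false
    simp only [Bool.false_eq_true, if_false, Nat.add_zero] at h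
    exact_mod_cast h
  have hkey : ((List.range grid.length).map (fun r => ((pvBorderRow grid r).countP id : Int))).sum
      = ((List.range grid.length).map (fun r => ((pvRuns false (pvBorderRow grid r)) : Int))).sum
        + ((List.range grid.length).map (fun r => (pvAdjL false (pvBorderRow grid r) : Int))).sum := by
    rw [List.map_congr_left (fun r _ => hpt r)]
    rw [PySem.List.sum_map_add_int]
  refine Prod.ext rfl ?_
  simp only
  omega
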